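-- pv_equiv track=rewrite | github.com/semajh/game-engines | connect4/rules.py | check_diagonal_up
-- ===== SOURCE A (Python) =====
-- def check_diagonal_up(board, num_rows, num_cols):
--     """check if any 4 are connected diagonally up(bottom left to top right)
--         returns bool"""
--     won = False
--     for row in range(3, num_rows):
--         for col in range(num_cols - 3):
--             start = board[row][col]
--             if start == " ":
--                 continue
--             won = True
--             for i in range(1, 4):
--                 if start != board[row - i][col + i]:
--                     won = False
--                     break
--             if won:
--                 return won
--     return won
-- ===== SOURCE B (Python) =====
-- def check_diagonal_up(board, num_rows, num_cols):
--     """check if any 4 are connected diagonally up(bottom left to top right)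
--         returns bool"""
--     if num_rows < 4 or num_cols < 4:
--         return False
--     starts = [(r, 0) for r in range(num_rows)]
--     starts += [(num_rows - 1, c) for c in range(1, num_cols)]
--     for r, c in starts:
--         run = 0
--         prev = None
--         while r >= 0 and c < num_cols:
--             cell = board[r][c]
--             if cell == " ":
--                 run = 0
--             elif cell == prev:
--                 run += 1
--             else:
--                 run = 1
--             if run >= 4:
--                 return True
--             prev = cell
--             r -= 1
--             c += 1
--     return False
-- ===== Notes on version B (the rewrite author's own statement) =====
-- stated objective: alternative
-- what changed: B replaces A's windowed scan (re-testing a fixed 4-cell window at every start cell) with a single run-length pass along each up-right diagonal, resetting the counter on blanks and value changes and returning True when it reaches 4.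
import Mathlib
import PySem

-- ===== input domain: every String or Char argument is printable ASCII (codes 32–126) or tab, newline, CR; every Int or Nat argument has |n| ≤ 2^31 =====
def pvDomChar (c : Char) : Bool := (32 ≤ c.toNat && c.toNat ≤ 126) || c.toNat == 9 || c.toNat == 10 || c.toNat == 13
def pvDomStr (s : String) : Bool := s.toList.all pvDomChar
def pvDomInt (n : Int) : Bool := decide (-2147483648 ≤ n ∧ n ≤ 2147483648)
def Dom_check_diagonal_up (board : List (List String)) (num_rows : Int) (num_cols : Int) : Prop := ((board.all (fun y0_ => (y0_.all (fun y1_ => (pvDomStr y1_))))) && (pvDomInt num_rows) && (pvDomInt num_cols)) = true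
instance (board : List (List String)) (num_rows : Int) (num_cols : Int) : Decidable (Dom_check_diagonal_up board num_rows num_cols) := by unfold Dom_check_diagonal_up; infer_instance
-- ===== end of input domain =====

-- B replaces A's windowed 4-cell re-scans with a single run-length pass along each up-right
-- diagonal (objective: alternative decomposition); equivalence is about the return value only.

-- ===== PORT A =====
-- board[r][c]; total via defaults, exact on inputs admitted by Pre_ (all indices in range there)
def pvCell (board : List (List String)) (r c : Int) : String :=
  (PySem.List.pyGet? ((PySem.List.pyGet? board r).getD []) c).getD ""

-- inner 'for i in range(1, 4)' with break: won stays True unless a mismatch is found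
def aInner (board : List (List String)) (start : String) (row col : Int) : List Int → Bool
  | [] => true
  | i :: rest =>
    if start ≠ pvCell board (row - i) (col + i) then false
    else aInner board start row col rest

-- inner 'for col in range(num_cols - 3)': returns (returned?, won)
def aCols (board : List (List String)) (row : Int) (won : Bool) : List Int → Bool × Bool
  | [] => (false, won)
  | col :: rest =>
    let start := pvCell board row col
    if start = " " then aCols board row won rest
    else
      let won' := aInner board start row col (PySem.List.pyRange 1 4 1)
      if won' then (true, won') else aCols board row won' rest

-- outer 'for row in range(3, num_rows)'
def aRows (board : List (List String)) (num_cols : Int) (won : Bool) : List Int → Bool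
  | [] => won
  | row :: rest =>
    match aCols board row won (PySem.List.pyRange 0 (num_cols - 3) 1) with
    | (true, w) => w
    | (false, w) => aRows board num_cols w rest

def check_diagonal_up (board : List (List String)) (num_rows : Int) (num_cols : Int) : Bool :=
  aRows board num_cols false (PySem.List.pyRange 3 num_rows 1)

-- ===== PORT B =====
-- 'while r >= 0 and c < num_cols': run-length walk up one diagonal
def bWalk (board : List (List String)) (num_cols : Int) (prev : Option String) (run : Int)
    (r c : Int) : Bool :=
  if h : 0 ≤ r ∧ c < num_cols then
    let cell := pvCell board r c
    let run' := if cell = " " then 0 else if some cell = prev then run + 1 else (1 : Int)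
    if run' ≥ 4 then true
    else bWalk board num_cols (some cell) run' (r - 1) (c + 1)
  else false
termination_by (r + 1).toNat
decreasing_by omega

def check_diagonal_up_alt (board : List (List String)) (num_rows : Int) (num_cols : Int) : Bool :=
  if num_rows < 4 ∨ num_cols < 4 then false
  else
    let starts := (PySem.List.pyRange 0 num_rows 1).map (fun r => (r, (0 : Int)))
      ++ (PySem.List.pyRange 1 num_cols 1).map (fun c => (num_rows - 1, c))
    starts.any (fun p => bWalk board num_cols none 0 p.1 p.2)

-- ===== PRECONDITION & SPEC =====
-- Pre_ excludes boards that do not contain the full num_rows×num_cols grid (short or ragged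
-- boards): there A either raises IndexError or returns only because its windowed scan happens
-- to skip (or to win before reaching) the missing cells, while a full-diagonal scan reads them.
def Pre_check_diagonal_up (board : List (List String)) (num_rows : Int) (num_cols : Int) : Prop :=
  (4 ≤ num_rows ∧ 4 ≤ num_cols) →
    (num_rows ≤ (board.length : Int) ∧
      ∀ row ∈ board.take num_rows.toNat, num_cols ≤ (row.length : Int))
instance (board : List (List String)) (num_rows : Int) (num_cols : Int) : Decidable (Pre_check_diagonal_up board num_rows num_cols) := by unfold Pre_check_diagonal_up; infer_instance

def pvWitness_check_diagonal_up : List (List String) × Int × Int :=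
  ([[" ", "X", " ", " "], ["X", "X", " ", " "], ["O", "O", "X", " "], ["O", "X", "O", "X"]], 4, 4)

def Spec_check_diagonal_up (board : List (List String)) (num_rows : Int) (num_cols : Int) (out : Bool) : Prop := out = check_diagonal_up_alt board num_rows num_cols
instance (board : List (List String)) (num_rows : Int) (num_cols : Int) (out : Bool) : Decidable (Spec_check_diagonal_up board num_rows num_cols out) := by unfold Spec_check_diagonal_up; infer_instance

-- ===== CLAIM (what is proved, stated in full; the proofs are below) =====
def Claim_equal_check_diagonal_up : Prop := ∀ (board : List (List String)) (num_rows : Int) (num_cols : Int), Dom_check_diagonal_up board num_rows num_cols → Pre_check_diagonal_up board num_rows num_cols → Spec_check_diagonal_up board num_rows num_cols (check_diagonal_up board num_rows num_cols)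

-- ===== LEMMAS AND PROOFS =====

-- a run of 4 equal non-blank cells going up-right from (r, c)
def Chain (board : List (List String)) (r c : Int) (m : ℕ) : Prop :=
  pvCell board r c ≠ " " ∧
    ∀ j : ℕ, j ≤ m → pvCell board (r - (j : Int)) (c + (j : Int)) = pvCell board r c

-- step m of the walk from (r, c) is inside the walked region
def ValidTo (nc r c : Int) (m : ℕ) : Prop := 0 ≤ r - (m : Int) ∧ c + (m : Int) < nc

-- some 4-window further up the diagonal from (r, c) wins
def WinFrom (board : List (List String)) (nc r c : Int) : Prop :=
  ∃ j : ℕ, ValidTo nc r c (j + 3) ∧ Chain board (r - (j : Int)) (c + (j : Int)) 3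

-- the function's meaning: a winning window inside the num_rows × num_cols grid
def WinIn (board : List (List String)) (nr nc : Int) : Prop :=
  ∃ r c : Int, 3 ≤ r ∧ r < nr ∧ 0 ≤ c ∧ c + 3 < nc ∧ Chain board r c 3

lemma chain_congr {board : List (List String)} {r c r' c' : Int} {m : ℕ}
    (hr : r = r') (hc : c = c') : Chain board r c m ↔ Chain board r' c' m := by
  subst hr; subst hc; rfl

lemma chain_mono {board : List (List String)} {r c : Int} {m m' : ℕ}
    (h : m' ≤ m) : Chain board r c m → Chain board r c m' := by
  rintro ⟨h0, hall⟩; exact ⟨h0, fun j hj => hall j (le_trans hj h)⟩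

lemma chain_shift {board : List (List String)} {r c : Int} {m : ℕ} :
    Chain board r c (m + 1) ↔
      (pvCell board r c ≠ " " ∧ pvCell board (r - 1) (c + 1) = pvCell board r c ∧
        Chain board (r - 1) (c + 1) m) := by
  constructor
  · rintro ⟨h0, hall⟩
    have h1 := hall 1 (by omega)
    simp only [Nat.cast_one] at h1
    refine ⟨h0, h1, ?_, ?_⟩
    · rw [h1]; exact h0
    · intro j hj
      have := hall (j + 1) (by omega)
      have e1 : r - ((j : ℕ) + 1 : ℕ) = r - 1 - (j : Int) := by push_cast; ring
      have e2 : c + ((j : ℕ) + 1 : ℕ) = c + 1 + (j : Int) := by push_cast; ring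
      rw [e1, e2] at this
      rw [this, h1]
  · rintro ⟨h0, heq, hne, hall⟩
    refine ⟨h0, ?_⟩
    intro j hj
    match j with
    | 0 => simp
    | j + 1 =>
      have := hall j (by omega)
      have e1 : r - ((j : ℕ) + 1 : ℕ) = r - 1 - (j : Int) := by push_cast; ring
      have e2 : c + ((j : ℕ) + 1 : ℕ) = c + 1 + (j : Int) := by push_cast; ring
      rw [e1, e2, this, heq]

lemma winFrom_shift {board : List (List String)} {nc r c : Int} :
    WinFrom board nc r c ↔
      (ValidTo nc r c 3 ∧ Chain board r c 3) ∨ WinFrom board nc (r - 1) (c + 1) := by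
  constructor
  · rintro ⟨j, hv, hc⟩
    match j with
    | 0 =>
      left
      refine ⟨hv, ?_⟩
      rwa [chain_congr (r' := r) (c' := c) (by push_cast; ring) (by push_cast; ring)] at hc
    | j + 1 =>
      right
      refine ⟨j, ?_, ?_⟩
      · unfold ValidTo at hv ⊢; push_cast at hv ⊢; omega
      · rwa [chain_congr (r' := r - 1 - (j : Int)) (c' := c + 1 + (j : Int))
          (by push_cast; ring) (by push_cast; ring)] at hc
  · rintro (⟨hv, hc⟩ | ⟨j, hv, hc⟩)
    · refine ⟨0, hv, ?_⟩
      rwa [chain_congr (r' := r - ((0 : ℕ) : Int)) (c' := c + ((0 : ℕ) : Int))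
        (by push_cast; ring) (by push_cast; ring)] at hc
    · refine ⟨j + 1, ?_, ?_⟩
      · unfold ValidTo at hv ⊢; push_cast at hv ⊢; omega
      · rwa [chain_congr (r' := r - ((j + 1 : ℕ) : Int)) (c' := c + ((j + 1 : ℕ) : Int))
          (by push_cast; ring) (by push_cast; ring)] at hc

-- a walk freshly restarted on a non-blank cell wins iff some window from the cell on wins
lemma fresh_step {board : List (List String)} {nc r c : Int}
    (hcell : pvCell board r c ≠ " ") :
    ((∃ m : ℕ, ValidTo nc (r - 1) (c + 1) m ∧ Chain board (r - 1) (c + 1) m ∧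
        pvCell board (r - 1) (c + 1) = pvCell board r c ∧ 4 ≤ (1 : Int) + ((m : Int) + 1)) ∨
      WinFrom board nc (r - 1) (c + 1)) ↔ WinFrom board nc r c := by
  constructor
  · rintro (⟨m, hv, hc, he, hge⟩ | hwf)
    · refine winFrom_shift.mpr (Or.inl ⟨?_, ?_⟩)
      · unfold ValidTo at hv ⊢; push_cast at hv ⊢; omega
      · have hm : 2 ≤ m := by omega
        exact chain_shift.mpr ⟨hcell, he, chain_mono hm hc⟩
    · exact winFrom_shift.mpr (Or.inr hwf)
  · intro hwf
    rcases winFrom_shift.mp hwf with (⟨hv, hc⟩ | hwf')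
    · obtain ⟨_, he, hc'⟩ := chain_shift.mp hc
      refine Or.inl ⟨2, ?_, hc', he, by norm_num⟩
      unfold ValidTo at hv ⊢; push_cast at hv ⊢; omega
    · exact Or.inr hwf'

-- the invariant of bWalk for a carried previous cell and run length
lemma bWalk_some_iff (board : List (List String)) (nc : Int) :
    ∀ (k : ℕ) (r c : Int), (r + 1).toNat ≤ k → ∀ (p : String) (n : Int), 0 ≤ n →
      (bWalk board nc (some p) n r c = true ↔
        ((∃ m : ℕ, ValidTo nc r c m ∧ Chain board r c m ∧ pvCell board r c = p ∧
            4 ≤ n + ((m : Int) + 1)) ∨ WinFrom board nc r c)) := by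
  intro k
  induction k with
  | zero =>
    intro r c hk p n hn
    have hrc : ¬ (0 ≤ r ∧ c < nc) := by omega
    rw [bWalk]
    simp only [dif_neg hrc]
    constructor
    · intro h; exact absurd h (by simp)
    · rintro (⟨m, ⟨hv1, hv2⟩, _⟩ | ⟨j, ⟨hv1, hv2⟩, _⟩) <;> exfalso <;> omega
  | succ k ih =>
    intro r c hk p n hn
    by_cases hrc : 0 ≤ r ∧ c < nc
    · rw [bWalk]
      simp only [dif_pos hrc]
      have hk' : (r - 1 + 1).toNat ≤ k := by omega
      by_cases hsp : pvCell board r c = " "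
      · simp only [if_pos hsp]
        have h04 : ¬ ((0 : Int) ≥ 4) := by omega
        simp only [if_neg h04]
        rw [ih (r - 1) (c + 1) hk' (pvCell board r c) 0 le_rfl]
        constructor
        · rintro (⟨m, _, hc, he, _⟩ | hwf)
          · exact absurd (he.trans hsp) hc.1
          · exact Or.inr (winFrom_shift.mpr (Or.inr hwf))
        · rintro (⟨m, _, hc, _⟩ | hwf)
          · exact absurd hsp hc.1
          · rcases winFrom_shift.mp hwf with (⟨_, hc⟩ | hwf')
            · exact absurd hsp hc.1
            · exact Or.inr hwf'
      · simp only [if_neg hsp]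
        by_cases hp : some (pvCell board r c) = some p
        · simp only [if_pos hp]
          have hpe : pvCell board r c = p := Option.some.inj hp
          by_cases hge : n + 1 ≥ 4
          · simp only [if_pos hge]
            constructor
            · intro _
              refine Or.inl ⟨0, ⟨by push_cast; omega, by push_cast; omega⟩, ?_, hpe, by push_cast; omega⟩
              refine ⟨hsp, ?_⟩
              intro j hj
              interval_cases j
              simp
            · intro _; trivial
          · simp only [if_neg hge]
            rw [ih (r - 1) (c + 1) hk' (pvCell board r c) (n + 1) (by omega)]
            constructor
            · rintro (⟨m, hv, hc, he, hge4⟩ | hwf)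
              · refine Or.inl ⟨m + 1, ?_, ?_, hpe, by push_cast at hge4 ⊢; omega⟩
                · unfold ValidTo at hv ⊢; push_cast at hv ⊢; omega
                · exact chain_shift.mpr ⟨hsp, he, hc⟩
              · exact Or.inr (winFrom_shift.mpr (Or.inr hwf))
            · rintro (⟨m, hv, hc, _, hge4⟩ | hwf)
              · match m with
                | 0 => exfalso; push_cast at hge4; omega
                | m + 1 =>
                  obtain ⟨_, he, hc'⟩ := chain_shift.mp hc
                  refine Or.inl ⟨m, ?_, hc', he, by push_cast at hge4 ⊢; omega⟩
                  unfold ValidTo at hv ⊢; push_cast at hv ⊢; omega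
              · rcases winFrom_shift.mp hwf with (⟨hv, hc⟩ | hwf')
                · obtain ⟨_, he, hc'⟩ := chain_shift.mp hc
                  refine Or.inl ⟨2, ?_, hc', he, by push_cast; omega⟩
                  unfold ValidTo at hv ⊢; push_cast at hv ⊢; omega
                · exact Or.inr hwf'
        · simp only [if_neg hp]
          have h14 : ¬ ((1 : Int) ≥ 4) := by omega
          simp only [if_neg h14]
          rw [ih (r - 1) (c + 1) hk' (pvCell board r c) 1 (by omega)]
          rw [fresh_step hsp]
          constructor
          · exact fun hwf => Or.inr hwf
          · rintro (⟨m, _, _, he, _⟩ | hwf)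
            · exact absurd (congrArg some he) hp
            · exact hwf
    · rw [bWalk]
      simp only [dif_neg hrc]
      constructor
      · intro h; exact absurd h (by simp)
      · rintro (⟨m, ⟨hv1, hv2⟩, _⟩ | ⟨j, ⟨hv1, hv2⟩, _⟩) <;> exfalso <;> omega

lemma bWalk_none_iff (board : List (List String)) (nc : Int) (r c : Int) :
    bWalk board nc none 0 r c = true ↔ WinFrom board nc r c := by
  by_cases hrc : 0 ≤ r ∧ c < nc
  · rw [bWalk]
    simp only [dif_pos hrc]
    have hnone : ¬ (some (pvCell board r c) = (none : Option String)) := by simp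
    by_cases hsp : pvCell board r c = " "
    · simp only [if_pos hsp]
      have h04 : ¬ ((0 : Int) ≥ 4) := by omega
      simp only [if_neg h04]
      rw [bWalk_some_iff board nc (r + 1).toNat (r - 1) (c + 1) (by omega)
        (pvCell board r c) 0 le_rfl]
      constructor
      · rintro (⟨m, _, hc, he, _⟩ | hwf)
        · exact absurd (he.trans hsp) hc.1
        · exact winFrom_shift.mpr (Or.inr hwf)
      · intro hwf
        rcases winFrom_shift.mp hwf with (⟨_, hc⟩ | hwf')
        · exact absurd hsp hc.1
        · exact Or.inr hwf'
    · simp only [if_neg hsp, if_neg hnone]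
      have h14 : ¬ ((1 : Int) ≥ 4) := by omega
      simp only [if_neg h14]
      rw [bWalk_some_iff board nc (r + 1).toNat (r - 1) (c + 1) (by omega)
        (pvCell board r c) 1 (by omega)]
      exact fresh_step hsp
  · rw [bWalk]
    simp only [dif_neg hrc]
    constructor
    · intro h; exact absurd h (by simp)
    · rintro ⟨j, ⟨hv1, hv2⟩, _⟩; exfalso; omega

lemma alt_iff (board : List (List String)) (nr nc : Int) :
    check_diagonal_up_alt board nr nc = true ↔ WinIn board nr nc := by
  unfold check_diagonal_up_alt
  by_cases hlt : nr < 4 ∨ nc < 4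
  · simp only [if_pos hlt]
    constructor
    · intro h; exact absurd h (by simp)
    · rintro ⟨r, c, h3, hrn, hc0, hc3, _⟩; exfalso; omega
  · simp only [if_neg hlt]
    rw [not_or, not_lt, not_lt] at hlt
    rw [List.any_eq_true]
    constructor
    · rintro ⟨p, hmem, hwalk⟩
      obtain ⟨j, hv, hc⟩ := (bWalk_none_iff board nc p.1 p.2).mp hwalk
      have hp : p.1 < nr ∧ 0 ≤ p.2 := by
        rcases List.mem_append.mp hmem with h | h <;>
          obtain ⟨x, hx, rfl⟩ := List.mem_map.mp h <;>
          rw [PySem.List.mem_pyRange_one] at hx <;> constructor <;> simp <;> omega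
      obtain ⟨hv1, hv2⟩ := hv
      refine ⟨p.1 - (j : Int), p.2 + (j : Int), by push_cast at hv1 ⊢; omega,
        by omega, by omega, by push_cast at hv2 ⊢; omega, hc⟩
    · rintro ⟨r, c, h3, hrn, hc0, hc3, hch⟩
      by_cases hs : r + c < nr
      · refine ⟨(r + c, 0), ?_, ?_⟩
        · exact List.mem_append.mpr (Or.inl (List.mem_map.mpr
            ⟨r + c, PySem.List.mem_pyRange_one.mpr ⟨by omega, hs⟩, rfl⟩))
        · rw [bWalk_none_iff]
          have hcast : ((c.toNat : ℕ) : Int) = c := Int.toNat_of_nonneg hc0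
          refine ⟨c.toNat, ⟨by push_cast; omega, by push_cast; omega⟩, ?_⟩
          rwa [chain_congr (r' := r) (c' := c) (by omega) (by omega)]
      · refine ⟨(nr - 1, r + c - (nr - 1)), ?_, ?_⟩
        · exact List.mem_append.mpr (Or.inr (List.mem_map.mpr
            ⟨r + c - (nr - 1), PySem.List.mem_pyRange_one.mpr ⟨by omega, by omega⟩, rfl⟩))
        · rw [bWalk_none_iff]
          have hcast : (((nr - 1 - r).toNat : ℕ) : Int) = nr - 1 - r :=
            Int.toNat_of_nonneg (by omega)
          refine ⟨(nr - 1 - r).toNat, ⟨by push_cast; omega, by push_cast; omega⟩, ?_⟩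
          rwa [chain_congr (r' := r) (c' := c) (by omega) (by omega)]

lemma aInner_iff (board : List (List String)) (start : String) (row col : Int) :
    aInner board start row col (PySem.List.pyRange 1 4 1) = true ↔
      (start = pvCell board (row - 1) (col + 1) ∧ start = pvCell board (row - 2) (col + 2) ∧
        start = pvCell board (row - 3) (col + 3)) := by
  have h : PySem.List.pyRange 1 4 1 = [1, 2, 3] := by decide
  rw [h]
  simp only [aInner]
  split_ifs <;> simp_all

lemma chain3_iff (board : List (List String)) (r c : Int) :
    Chain board r c 3 ↔
      (pvCell board r c ≠ " " ∧ pvCell board r c = pvCell board (r - 1) (c + 1) ∧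
        pvCell board r c = pvCell board (r - 2) (c + 2) ∧
        pvCell board r c = pvCell board (r - 3) (c + 3)) := by
  unfold Chain
  constructor
  · rintro ⟨h0, h⟩
    have h1 := h 1 (by omega); have h2 := h 2 (by omega); have h3 := h 3 (by omega)
    push_cast at h1 h2 h3
    exact ⟨h0, h1.symm, h2.symm, h3.symm⟩
  · rintro ⟨h0, h1, h2, h3⟩
    refine ⟨h0, ?_⟩
    intro j hj
    interval_cases j <;> push_cast <;> norm_num <;> simp_all
-- Boolean form of a 4-window win, for list.any characterizations
def chainB (board : List (List String)) (r c : Int) : Bool :=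
  (!(pvCell board r c == " ")) && (pvCell board r c == pvCell board (r - 1) (c + 1)) &&
    (pvCell board r c == pvCell board (r - 2) (c + 2)) &&
    (pvCell board r c == pvCell board (r - 3) (c + 3))

lemma chainB_iff (board : List (List String)) (r c : Int) :
    chainB board r c = true ↔ Chain board r c 3 := by
  rw [chain3_iff]
  simp only [chainB, Bool.and_eq_true, Bool.not_eq_true', beq_eq_false_iff_ne, beq_iff_eq]
  tauto

lemma aCols_pair (board : List (List String)) (row : Int) :
    ∀ cols : List Int, aCols board row false cols =
      (cols.any (chainB board row),
        cols.any (chainB board row)) := by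
  intro cols
  induction cols with
  | nil => simp [aCols]
  | cons col rest ih =>
    by_cases hsp : pvCell board row col = " "
    · have hnc : chainB board row col = false := by
        rw [Bool.eq_false_iff]
        exact fun h => ((chainB_iff _ _ _).mp h).1 hsp
      simp [aCols, hsp, ih, hnc]
    · have hwin : (aInner board (pvCell board row col) row col (PySem.List.pyRange 1 4 1) = true)
        ↔ Chain board row col 3 := by
        rw [aInner_iff, chain3_iff]; tauto
      by_cases hA : aInner board (pvCell board row col) row col (PySem.List.pyRange 1 4 1) = true
      · have hc : chainB board row col = true := (chainB_iff _ _ _).mpr (hwin.mp hA)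
        simp [aCols, hsp, hA, hc]
      · have hc : chainB board row col = false := by
          rw [Bool.eq_false_iff]
          exact fun h => hA (hwin.mpr ((chainB_iff _ _ _).mp h))
        simp [aCols, hsp, hA, ih, hc]

lemma aRows_eq (board : List (List String)) (nc : Int) :
    ∀ rows : List Int, aRows board nc false rows =
      rows.any (fun row => (PySem.List.pyRange 0 (nc - 3) 1).any
        (chainB board row)) := by
  intro rows
  induction rows with
  | nil => simp [aRows]
  | cons row rest ih =>
    rw [aRows, aCols_pair]
    cases hb : (PySem.List.pyRange 0 (nc - 3) 1).any (chainB board row) <;>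
      simp [hb, ih]

lemma a_iff (board : List (List String)) (nr nc : Int) :
    check_diagonal_up board nr nc = true ↔ WinIn board nr nc := by
  unfold check_diagonal_up
  rw [aRows_eq]
  rw [List.any_eq_true]
  constructor
  · rintro ⟨row, hrow, h⟩
    rw [List.any_eq_true] at h
    obtain ⟨c, hc, hch⟩ := h
    rw [PySem.List.mem_pyRange_one] at hrow hc
    exact ⟨row, c, hrow.1, hrow.2, hc.1, by omega, (chainB_iff _ _ _).mp hch⟩
  · rintro ⟨r, c, h3, hrn, hc0, hc3, hch⟩
    refine ⟨r, PySem.List.mem_pyRange_one.mpr ⟨h3, hrn⟩, ?_⟩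
    rw [List.any_eq_true]
    exact ⟨c, PySem.List.mem_pyRange_one.mpr ⟨hc0, by omega⟩, (chainB_iff _ _ _).mpr hch⟩

-- ===== VERDICT (by name: the statement is the Claim_ definition above) =====
theorem check_diagonal_up_spec : Claim_equal_check_diagonal_up := by
  intro board nr nc _ _
  unfold Spec_check_diagonal_up
  have h1 := a_iff board nr nc
  have h2 := alt_iff board nr nc
  cases hA : check_diagonal_up board nr nc <;> cases hB : check_diagonal_up_alt board nr nc <;>
    simp_all
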